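-- pv_equiv track=rewrite | github.com/FranzSkuffka/Prog1_WS17 | WS17_HA08/crossword_helper.py | maskword
-- ===== SOURCE A (Python) =====
-- def maskword(word, masked_char, maskedcharatindex):
--   """Takes a word and a list of indices, returns a masked word."""
--   output = []
--   for i in range(len(word)):
--     if i in maskedcharatindex:
--       output.append(masked_char)
--     else:
--       output.append(word[i])
--   return "".join(output)
-- ===== SOURCE B (Python) =====
-- def maskword(word, masked_char, maskedcharatindex):
--   """Takes a word and a list of indices, returns a masked word."""
--   chars = list(word)
--   n = len(word)
--   for idx in maskedcharatindex:
--     if 0 <= idx < n: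
--       chars[idx] = masked_char
--   return "".join(chars)
-- ===== Notes on version B (the rewrite author's own statement) =====
-- stated objective: faster
-- what changed: Instead of scanning every word position and testing membership in the index list, B copies the word into a buffer once and scatter-writes masked_char at each in-range index, so the O(len(word)*len(indices)) membership scans disappear.
import Mathlib
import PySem

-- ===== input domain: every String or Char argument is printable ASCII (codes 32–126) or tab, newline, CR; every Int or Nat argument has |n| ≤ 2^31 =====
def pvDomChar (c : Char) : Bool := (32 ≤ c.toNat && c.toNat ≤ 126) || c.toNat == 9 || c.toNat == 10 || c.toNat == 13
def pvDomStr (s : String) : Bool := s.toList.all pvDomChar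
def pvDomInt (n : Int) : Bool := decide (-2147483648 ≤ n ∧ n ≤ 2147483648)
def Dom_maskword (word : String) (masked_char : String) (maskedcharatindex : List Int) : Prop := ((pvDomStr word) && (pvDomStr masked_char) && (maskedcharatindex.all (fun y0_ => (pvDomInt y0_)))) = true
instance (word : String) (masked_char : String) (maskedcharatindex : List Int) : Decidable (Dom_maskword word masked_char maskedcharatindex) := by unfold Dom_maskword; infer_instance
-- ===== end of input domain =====

-- B replaces A's scan of every word position (with a membership test per position) by a single
-- scatter-write pass over the index list; objective: faster (no per-position list scan).

-- ===== PORT A =====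
-- A: for i in range(len(word)): append masked_char if i in maskedcharatindex else word[i]; join.
-- word[i] is always in range here; the `.getD ""` default of the Option is unreachable.
def maskword (word : String) (masked_char : String) (maskedcharatindex : List Int) : String :=
  let output : List String :=
    (PySem.List.pyRange 0 (PySem.Str.len word) 1).foldl
      (fun output i =>
        if i ∈ maskedcharatindex then
          output ++ [masked_char]
        else
          output ++ [((PySem.Str.pyGet? word i).map (fun c => String.ofList [c])).getD ""]) []
  PySem.Str.join "" output

-- ===== PORT B =====
-- B: chars = list(word); for idx in maskedcharatindex: if 0 <= idx < n: chars[idx] = masked_char; join.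
def maskword_alt (word : String) (masked_char : String) (maskedcharatindex : List Int) : String :=
  let n : Int := PySem.Str.len word
  let chars : List String := word.toList.map (fun c => String.ofList [c])
  let chars : List String :=
    maskedcharatindex.foldl
      (fun cs idx => if 0 ≤ idx ∧ idx < n then PySem.List.pySetD cs idx masked_char else cs)
      chars
  PySem.Str.join "" chars

-- ===== PRECONDITION & SPEC =====
def Spec_maskword (word : String) (masked_char : String) (maskedcharatindex : List Int) (out : String) : Prop := out = maskword_alt word masked_char maskedcharatindex
instance (word : String) (masked_char : String) (maskedcharatindex : List Int) (out : String) : Decidable (Spec_maskword word masked_char maskedcharatindex out) := by unfold Spec_maskword; infer_instance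

-- ===== CLAIM (what is proved, stated in full; the proofs are below) =====
def Claim_equal_maskword : Prop := ∀ (word : String) (masked_char : String) (maskedcharatindex : List Int), Dom_maskword word masked_char maskedcharatindex → Spec_maskword word masked_char maskedcharatindex (maskword word masked_char maskedcharatindex)

-- ===== LEMMAS AND PROOFS =====

-- B's scatter loop preserves the buffer length.
theorem maskword_fold_length (mc : String) (n : Int) (idxs : List Int) (cs : List String) :
    (idxs.foldl
      (fun cs idx => if 0 ≤ idx ∧ idx < n then PySem.List.pySetD cs idx mc else cs)
      cs).length = cs.length := by
  induction idxs generalizing cs with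
  | nil => rfl
  | cons idx rest ih =>
    simp only [List.foldl_cons]
    rw [ih]
    split_ifs with h
    · exact PySem.List.length_pySetD cs idx mc
    · rfl

-- What B's scatter loop leaves at position i: masked_char iff i occurs in the index list.
theorem maskword_fold_get (mc : String) (n : Int) (idxs : List Int) (cs : List String)
    (i : Nat) (hi : i < cs.length) (hin : (i : Int) < n) :
    (idxs.foldl
      (fun cs idx => if 0 ≤ idx ∧ idx < n then PySem.List.pySetD cs idx mc else cs)
      cs)[i]? = if (i : Int) ∈ idxs then some mc else cs[i]? := by
  induction idxs generalizing cs with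
  | nil => simp
  | cons idx rest ih =>
    simp only [List.foldl_cons]
    by_cases hg : 0 ≤ idx ∧ idx < n
    · rw [if_pos hg, ih _ (by rw [PySem.List.length_pySetD]; exact hi),
          PySem.List.pySetD_of_nonneg _ mc hg.1, List.getElem?_set]
      simp only [List.mem_cons]
      by_cases hmem : (i : Int) ∈ rest
      · simp [hmem]
      · by_cases heq : idx = (i : Int)
        · have h1 : idx.toNat = i := by omega
          simp [hmem, heq, hi]
        · have h1 : idx.toNat ≠ i := by omega
          have h2 : ¬ ((i : Int) = idx) := fun h => heq h.symm
          simp [hmem, h1, h2]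
    · rw [if_neg hg, ih _ hi]
      have h2 : ¬ ((i : Int) = idx) := by omega
      simp [h2]

-- A's loop body written with the `if` inside the appended singleton.
theorem maskword_body_eq (word mc : String) (idxs : List Int) (out : List String) (i : Int) :
    (if i ∈ idxs then out ++ [mc]
     else out ++ [((PySem.Str.pyGet? word i).map (fun c => String.ofList [c])).getD ""]) =
    out ++ [if i ∈ idxs then mc
            else ((PySem.Str.pyGet? word i).map (fun c => String.ofList [c])).getD ""] := by
  split_ifs <;> rfl

-- The two joined lists are equal.
theorem maskword_lists_eq (word mc : String) (idxs : List Int) :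
    ((PySem.List.pyRange 0 (PySem.Str.len word) 1).foldl
      (fun output i =>
        if i ∈ idxs then output ++ [mc]
        else output ++ [((PySem.Str.pyGet? word i).map (fun c => String.ofList [c])).getD ""]) []) =
    (idxs.foldl
      (fun cs idx => if 0 ≤ idx ∧ idx < (PySem.Str.len word : Int) then PySem.List.pySetD cs idx mc else cs)
      (word.toList.map (fun c => String.ofList [c]))) := by
  have hA :
      ((PySem.List.pyRange 0 (PySem.Str.len word) 1).foldl
        (fun output i =>
          if i ∈ idxs then output ++ [mc]
          else output ++ [((PySem.Str.pyGet? word i).map (fun c => String.ofList [c])).getD ""]) []) =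
      (PySem.List.pyRange 0 (PySem.Str.len word) 1).map
        (fun i => if i ∈ idxs then mc
                  else ((PySem.Str.pyGet? word i).map (fun c => String.ofList [c])).getD "") := by
    rw [PySem.List.foldl_congr_mem _ _ _ _
          (fun acc a _ => maskword_body_eq word mc idxs acc a),
        PySem.List.foldl_append_singleton_eq_map, List.nil_append]
  rw [hA]
  have hl : PySem.Str.len word = (word.toList.length : Int) := PySem.Str.len_eq word
  apply List.ext_getElem?
  intro k
  by_cases hk : k < word.toList.length
  · rw [hl, PySem.List.getElem?_map_pyRange_zero _ _ _ hk,
        maskword_fold_get mc _ idxs _ k (by simpa using hk) (by exact_mod_cast hk)]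
    by_cases hmem : (k : Int) ∈ idxs
    · simp [hmem]
    · rw [if_neg hmem, if_neg hmem]
      simp [List.getElem?_map, List.getElem?_eq_getElem hk]
  · rw [List.getElem?_eq_none, List.getElem?_eq_none]
    · rw [maskword_fold_length, List.length_map]
      omega
    · rw [List.length_map, hl, PySem.List.pyRange_zero_nat, List.length_map, List.length_range]
      omega

theorem maskword_join_congr (a b : List String) (h : a = b) :
    PySem.Str.join "" a = PySem.Str.join "" b := by rw [h]
-- ===== VERDICT (by name: the statement is the Claim_ definition above) =====
theorem maskword_spec : Claim_equal_maskword := by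
  intro word mc idxs _
  unfold Spec_maskword maskword maskword_alt
  exact maskword_join_congr _ _ (maskword_lists_eq word mc idxs)
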